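-- pv_equiv track=rewrite | github.com/shiyao-li/MAGICIAN | macarons/utility/macarons_utils.py | _get_neighbors_within_steps
-- ===== SOURCE A (Python) =====
-- def _get_neighbors_within_steps(indices, step_limit):
--     """获取指定步数范围内的所有可能邻居索引（部分维度考虑环形拓扑）"""
--     max_values = [8, 4, 6, 5, 10]
--     is_circular = [False, False, False, True, True]  # 只有后两个维度是环形的
--     neighbors = []
--
--     def generate_neighbors_recursive(current_indices, remaining_steps, start_dim=0):
--         if remaining_steps == 0:
--             if current_indices != indices:  # 不包括自己
--                 neighbors.append(current_indices[:])
--             return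
--
--         if start_dim >= len(current_indices):
--             return
--
--         # 尝试在当前维度上移动
--         for dim in range(start_dim, len(current_indices)):
--             if dim < len(max_values):
--                 max_val = max_values[dim]
--                 original_val = current_indices[dim]
--
--                 # 尝试+1和-1
--                 for delta in [-1, 1]:
--                     if is_circular[dim]:
--                         # 环形维度：使用模运算
--                         new_val = (original_val + delta) % max_val
--                     else:
--                         # 线性维度：检查边界
--                         new_val = original_val + delta
--                         if new_val < 0 or new_val >= max_val:
--                             continue  # 超出边界，跳过
--
--                     current_indices[dim] = new_val
--                     generate_neighbors_recursive(current_indices, remaining_steps - 1, dim + 1)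
--                     current_indices[dim] = original_val  # 恢复
--             else:
--                 # 对于超出预定义范围的维度，使用普通+1/-1
--                 original_val = current_indices[dim]
--                 for delta in [-1, 1]:
--                     new_val = max(0, original_val + delta)  # 简单边界处理
--                     current_indices[dim] = new_val
--                     generate_neighbors_recursive(current_indices, remaining_steps - 1, dim + 1)
--                     current_indices[dim] = original_val  # 恢复
--
--     generate_neighbors_recursive(indices[:], step_limit)
--     return neighbors
-- ===== SOURCE B (Python) =====
-- def _get_neighbors_within_steps(indices, step_limit):
--     """Same result as A: build all leaf index tuples via moves-list + flatMap, filter self out once at the end."""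
--     max_values = [8, 4, 6, 5, 10]
--     is_circular = [False, False, False, True, True]
--
--     def moves(cur, dim):
--         # candidate (d, new_value) moves for dims >= dim, in DFS order (d ascending, -1 before +1)
--         out = []
--         for d in range(dim, len(cur)):
--             for delta in (-1, 1):
--                 if d < len(max_values):
--                     if is_circular[d]:
--                         out.append((d, (cur[d] + delta) % max_values[d]))
--                     else:
--                         nv = cur[d] + delta
--                         if 0 <= nv < max_values[d]:
--                             out.append((d, nv))
--                 else:
--                     out.append((d, max(0, cur[d] + delta)))
--         return out
--
--     def leaves(cur, r, dim):
--         if r == 0: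
--             return [cur]
--         return [leaf
--                 for d, nv in moves(cur, dim)
--                 for leaf in leaves(cur[:d] + [nv] + cur[d + 1:], r - 1, d + 1)]
--
--     return [t for t in leaves(list(indices), step_limit, 0) if t != indices]
-- ===== Notes on version B (the rewrite author's own statement) =====
-- stated objective: alternative
-- what changed: Replaces the mutate-and-restore accumulator DFS by a compositional rewrite: a 'moves' helper first lists all candidate (dim, new_value) moves, leaves are collected by a flatMap-style comprehension building fresh lists, and the self-exclusion test is applied once by a final filter instead of at every leaf.
import Mathlib
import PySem

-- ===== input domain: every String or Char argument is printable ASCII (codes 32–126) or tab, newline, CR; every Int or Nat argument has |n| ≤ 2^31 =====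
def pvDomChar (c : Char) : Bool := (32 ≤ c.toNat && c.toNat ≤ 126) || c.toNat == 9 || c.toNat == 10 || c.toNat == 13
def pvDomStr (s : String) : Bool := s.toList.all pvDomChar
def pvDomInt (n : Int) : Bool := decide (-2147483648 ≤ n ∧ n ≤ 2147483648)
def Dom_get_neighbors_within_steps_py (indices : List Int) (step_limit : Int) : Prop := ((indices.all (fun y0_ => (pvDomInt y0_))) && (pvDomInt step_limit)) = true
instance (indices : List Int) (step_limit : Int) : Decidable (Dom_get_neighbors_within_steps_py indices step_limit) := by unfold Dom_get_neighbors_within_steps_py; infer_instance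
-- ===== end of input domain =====

-- B rebuilds the same DFS neighbour list compositionally: a moves list + flatMap of leaf lists,
-- with the self-exclusion done by a single final filter instead of at every leaf (objective: alternative).
-- ===== PORT A =====
-- Port of A: recursive DFS threading an accumulator; the per-dim loop and the
-- `start_dim >= len` check are merged into one recursion on `dim` (the loop is
-- empty exactly when start_dim >= len, so the behaviour is identical).
def pvMaxValues : List Int := [8, 4, 6, 5, 10]

def pvGenA (indices cur : List Int) (remaining : Int) (dim : Nat)
    (acc : List (List Int)) : List (List Int) :=
  if remaining = 0 then
    (if cur = indices then acc else acc ++ [cur])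
  else if h : dim < cur.length then
    let orig := cur.getD dim 0
    let acc1 :=
      if dim < 5 then
        let maxVal := pvMaxValues.getD dim 0
        if dim == 3 || dim == 4 then
          -- circular: Python % with positive modulus
          let a1 := pvGenA indices (cur.set dim (PySem.Int.mod (orig + (-1)) maxVal)) (remaining - 1) (dim + 1) acc
          pvGenA indices (cur.set dim (PySem.Int.mod (orig + 1) maxVal)) (remaining - 1) (dim + 1) a1
        else
          let a1 := if orig + (-1) < 0 ∨ orig + (-1) ≥ maxVal then acc
            else pvGenA indices (cur.set dim (orig + (-1))) (remaining - 1) (dim + 1) acc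
          if orig + 1 < 0 ∨ orig + 1 ≥ maxVal then a1
          else pvGenA indices (cur.set dim (orig + 1)) (remaining - 1) (dim + 1) a1
      else
        let a1 := pvGenA indices (cur.set dim (max 0 (orig + (-1)))) (remaining - 1) (dim + 1) acc
        pvGenA indices (cur.set dim (max 0 (orig + 1))) (remaining - 1) (dim + 1) a1
    pvGenA indices cur remaining (dim + 1) acc1
  else acc
termination_by cur.length - dim
decreasing_by all_goals (try simp [List.length_set]); all_goals omega

def get_neighbors_within_steps_py (indices : List Int) (step_limit : Int) : List (List Int) :=
  pvGenA indices indices step_limit 0 []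

-- ===== PORT B =====
-- Port of B: first compute the list of candidate (dim, new_value) moves, then
-- flatMap the leaf lists together, and filter the original indices out once at the end.
def pvMovesAt (cur : List Int) (dim : Nat) : List (Nat × Int) :=
  let orig := cur.getD dim 0
  if dim < 5 then
    let maxVal := pvMaxValues.getD dim 0
    if dim == 3 || dim == 4 then
      [(dim, PySem.Int.mod (orig + (-1)) maxVal), (dim, PySem.Int.mod (orig + 1) maxVal)]
    else
      (if 0 ≤ orig + (-1) ∧ orig + (-1) < maxVal then [(dim, orig + (-1))] else []) ++
      (if 0 ≤ orig + 1 ∧ orig + 1 < maxVal then [(dim, orig + 1)] else [])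
  else
    [(dim, max 0 (orig + (-1))), (dim, max 0 (orig + 1))]

def pvMoves (cur : List Int) (dim : Nat) : List (Nat × Int) :=
  if dim < cur.length then
    pvMovesAt cur dim ++ pvMoves cur (dim + 1)
  else []
termination_by cur.length - dim

-- termination helper for pvLeaves, cited by its decreasing_by
theorem pvMoves_dim_le (cur : List Int) (dim : Nat) :
    ∀ p ∈ pvMoves cur dim, dim ≤ p.1 ∧ p.1 < cur.length := by
  induction dim using pvMoves.induct (cur := cur) with
  | case1 dim h ih =>
    intro p hp
    rw [pvMoves, if_pos h] at hp
    rcases List.mem_append.1 hp with hp | hp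
    · have : p.1 = dim := by
        simp only [pvMovesAt] at hp
        split at hp
        · split at hp
          · simp only [List.mem_cons, List.not_mem_nil, or_false] at hp
            rcases hp with h | h <;> simp [h]
          · rcases List.mem_append.1 hp with h | h <;>
              (split at h <;> simp only [List.mem_cons, List.not_mem_nil, or_false] at h) <;> simp [h]
        · simp only [List.mem_cons, List.not_mem_nil, or_false] at hp
          rcases hp with h | h <;> simp [h]
      omega
    · have := ih p hp; omega
  | case2 dim h =>
    intro p hp; rw [pvMoves, if_neg h] at hp; simp at hp

def pvLeaves (cur : List Int) (r : Int) (dim : Nat) : List (List Int) :=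
  if r = 0 then [cur]
  else (pvMoves cur dim).attach.flatMap
    (fun p => pvLeaves (cur.set p.1.1 p.1.2) (r - 1) (p.1.1 + 1))
termination_by cur.length - dim
decreasing_by
  have := pvMoves_dim_le cur dim _ p.2
  simp [List.length_set]; omega

def get_neighbors_within_steps_py_alt (indices : List Int) (step_limit : Int) : List (List Int) :=
  (pvLeaves indices step_limit 0).filter (· ≠ indices)

-- ===== PRECONDITION & SPEC =====
def Spec_get_neighbors_within_steps_py (indices : List Int) (step_limit : Int) (out : List (List Int)) : Prop := out = get_neighbors_within_steps_py_alt indices step_limit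
instance (indices : List Int) (step_limit : Int) (out : List (List Int)) : Decidable (Spec_get_neighbors_within_steps_py indices step_limit out) := by unfold Spec_get_neighbors_within_steps_py; infer_instance

-- ===== CLAIM (what is proved, stated in full; the proofs are below) =====
def Claim_equal_get_neighbors_within_steps_py : Prop := ∀ (indices : List Int) (step_limit : Int), Dom_get_neighbors_within_steps_py indices step_limit → Spec_get_neighbors_within_steps_py indices step_limit (get_neighbors_within_steps_py indices step_limit)

-- ===== LEMMAS AND PROOFS =====

theorem attach_flatMap_eq {α β : Type} (l : List α) (f : α → List β) :
    l.attach.flatMap (fun p => f p.1) = l.flatMap f := by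
  conv_rhs => rw [← List.attach_map_subtype_val l]
  rw [List.flatMap_map]

theorem pvLeaves_core (cur : List Int) (r : Int) (dim : Nat) (hr : r ≠ 0) :
    pvLeaves cur r dim =
      (pvMoves cur dim).flatMap (fun q => pvLeaves (cur.set q.1 q.2) (r - 1) (q.1 + 1)) := by
  rw [pvLeaves, if_neg hr]
  exact attach_flatMap_eq (pvMoves cur dim)
    (fun q => pvLeaves (cur.set q.1 q.2) (r - 1) (q.1 + 1))

theorem pvLeaves_zero (cur : List Int) (dim : Nat) : pvLeaves cur 0 dim = [cur] := by
  rw [pvLeaves]; simp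

theorem pvLeaves_out (cur : List Int) (r : Int) (dim : Nat) (hr : r ≠ 0)
    (h : ¬ dim < cur.length) : pvLeaves cur r dim = [] := by
  rw [pvLeaves_core cur r dim hr, pvMoves, if_neg h]; simp

theorem pvLeaves_split (cur : List Int) (r : Int) (dim : Nat) (hr : r ≠ 0)
    (h : dim < cur.length) :
    pvLeaves cur r dim =
      (pvMovesAt cur dim).flatMap (fun q => pvLeaves (cur.set q.1 q.2) (r - 1) (q.1 + 1))
        ++ pvLeaves cur r (dim + 1) := by
  rw [pvLeaves_core cur r dim hr, pvMoves, if_pos h, List.flatMap_append,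
    pvLeaves_core cur r (dim + 1) hr]

theorem genA_zero (indices cur : List Int) (dim : Nat) (acc : List (List Int)) :
    pvGenA indices cur 0 dim acc = acc ++ (pvLeaves cur 0 dim).filter (· ≠ indices) := by
  rw [pvGenA, pvLeaves_zero]
  by_cases h : cur = indices <;> simp [h, List.filter]

theorem genA_eq (indices : List Int) (n : Nat) :
    ∀ (cur : List Int) (r : Int) (dim : Nat) (acc : List (List Int)),
      cur.length - dim ≤ n →
      pvGenA indices cur r dim acc = acc ++ (pvLeaves cur r dim).filter (· ≠ indices) := by
  induction n with
  | zero =>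
    intro cur r dim acc hn
    by_cases hr : r = 0
    · subst hr; exact genA_zero indices cur dim acc
    · have h : ¬ dim < cur.length := by omega
      rw [pvGenA, if_neg hr, dif_neg h, pvLeaves_out cur r dim hr h]; simp
  | succ n ih =>
    intro cur r dim acc hn
    by_cases hr : r = 0
    · subst hr; exact genA_zero indices cur dim acc
    by_cases h : dim < cur.length
    · have hm : cur.length - (dim + 1) ≤ n := by omega
      have hms : ∀ v : Int, (cur.set dim v).length - (dim + 1) ≤ n := by
        intro v; simp [List.length_set]; omega
      have ihset : ∀ (v : Int) (r' : Int) (a : List (List Int)),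
          pvGenA indices (cur.set dim v) r' (dim + 1) a
            = a ++ (pvLeaves (cur.set dim v) r' (dim + 1)).filter (· ≠ indices) :=
        fun v r' a => ih (cur.set dim v) r' (dim + 1) a (hms v)
      rw [pvGenA]
      simp only [if_neg hr, dif_pos h]
      rw [pvLeaves_split cur r dim hr h, List.filter_append, ← List.append_assoc]
      rw [ih cur r (dim + 1) _ hm]
      congr 1
      rw [pvMovesAt]
      by_cases h5 : dim < 5
      · simp only [if_pos h5]
        by_cases hc : (dim == 3 || dim == 4) = true
        · simp only [if_pos hc]
          simp [ihset, List.filter_append, List.append_assoc]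
        · simp only [if_neg hc]
          split_ifs <;>
            first
              | (exfalso; omega)
              | simp [ihset, List.filter_append, List.append_assoc]
      · simp only [if_neg h5]
        simp [ihset, List.filter_append, List.append_assoc]
    · rw [pvGenA, if_neg hr, dif_neg h, pvLeaves_out cur r dim hr h]; simp

-- ===== VERDICT (by name: the statement is the Claim_ definition above) =====
theorem get_neighbors_within_steps_py_spec : Claim_equal_get_neighbors_within_steps_py := by
  intro indices step_limit _
  unfold Spec_get_neighbors_within_steps_py get_neighbors_within_steps_py
    get_neighbors_within_steps_py_alt
  rw [genA_eq indices indices.length indices step_limit 0 [] (by omega)]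
  simp
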